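-- pv_equiv track=rewrite | github.com/Kasl0/WDI | Cwiczenia 5 - zadania/25.py | przejscie
-- ===== SOURCE A (Python) =====
-- def przejscie(T, i=0, skokow=0):
--     if i == len(T)-1:
--         return skokow
--     if i > len(T)-1:
--         return -1
--
--     b = 2
--     n = T[i]
--     while n > 1 and b*b <= n:
--         if n % b == 0:
--             res = przejscie(T, i+b, skokow+1)
--             if res > 0:
--                 return res
--             n //= b
--         else:
--             b += 1
--     if n > 1 and n != T[i]:
--         return przejscie(T, i+n, skokow+1)
-- ===== SOURCE B (Python) =====
-- def _factors(n):
--     # prime factors of n in nondecreasing order, with multiplicity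
--     fs = []
--     d = 2
--     while d * d <= n:
--         if n % d == 0:
--             fs.append(d)
--             n //= d
--         else:
--             d += 1
--     if n > 1:
--         fs.append(n)
--     return fs
--
--
-- def przejscie(T, i=0, skokow=0):
--     last = len(T) - 1
--     if i == last:
--         return skokow
--     if i > last:
--         return -1
--     # bottom-up table: h[j] = fewest-as-found-by-A extra jumps from j, absent = unreachable
--     h = {}
--
--     def val(j):
--         if j == last:
--             return 0
--         if j > last:
--             return -1
--         return h.get(j, -1)
--
--     for j in reversed(range(i, last)):
--         for p in _factors(T[j]):
--             r = val(j + p)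
--             if r >= 0:
--                 h[j] = 1 + r
--                 break
--     r = val(i)
--     return skokow + r if r >= 0 else -1
-- ===== Notes on version B (the rewrite author's own statement) =====
-- stated objective: alternative
-- what changed: A's branching DFS (which re-explores the same indices once per prime-factor occurrence, with no sharing between sibling searches) is replaced by a bottom-up dynamic program: one pass over the indices from the end backwards fills a memo table with the jump count found from each index, factoring each value exactly once.
-- outside the precondition, e.g. on przejscie([30, 28, 10], 0, -4): A returns -1, B returns -3; on przejscie([2, 4], 0, 0): A returns None, B returns -1; on przejscie([6, 4, 2, 9], 0, 0): A raises TypeError, B returns 1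
import Mathlib
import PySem

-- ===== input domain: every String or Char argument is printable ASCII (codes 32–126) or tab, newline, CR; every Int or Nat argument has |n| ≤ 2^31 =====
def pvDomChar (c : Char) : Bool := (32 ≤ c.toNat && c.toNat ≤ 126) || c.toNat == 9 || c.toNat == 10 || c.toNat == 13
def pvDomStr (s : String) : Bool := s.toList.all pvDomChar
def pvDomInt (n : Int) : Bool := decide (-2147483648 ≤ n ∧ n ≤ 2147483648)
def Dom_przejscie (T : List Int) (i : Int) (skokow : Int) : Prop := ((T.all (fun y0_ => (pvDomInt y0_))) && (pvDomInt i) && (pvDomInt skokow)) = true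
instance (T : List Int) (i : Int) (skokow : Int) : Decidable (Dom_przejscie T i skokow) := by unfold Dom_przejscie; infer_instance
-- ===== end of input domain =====

-- B replaces A's branching DFS (which re-explores indices with no sharing between sibling
-- searches) by a bottom-up memo table over indices, one factorization per index; objective:
-- alternative (a timing run's large inputs lie outside Pre_, so no speed is claimed).

-- ===== PORT A =====
-- A's while loop; 'rec' is the enclosing recursive function, 'lf' a fuel bound on the
-- iteration count ((n+1-b).toNat strictly decreases; inputs admitted by Pre_ never exhaust it).
-- Python's 'res > 0' raises TypeError when res is None; here that none is propagated
-- (such inputs lie outside Pre_przejscie).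
def przejscieWhile (rec : Int → Int → Option Int) (T : List Int) (i skokow : Int) :
    Nat → Int → Int → Option Int
  | 0, _, _ => none  -- fuel exhausted (unreachable: lf bounds the loop's iterations)
  | lf + 1, n, b =>
    if 1 < n ∧ b * b ≤ n then
      if PySem.Int.mod n b = 0 then
        match rec (i + b) (skokow + 1) with
        | none => none  -- Python raises TypeError on 'None > 0' (outside Pre_przejscie)
        | some res =>
          if res > 0 then some res
          else przejscieWhile rec T i skokow lf (PySem.Int.floordiv n b) b
      else przejscieWhile rec T i skokow lf n (b + 1)
    else
      if 1 < n ∧ n ≠ (PySem.List.pyGet? T i).getD 0 then rec (i + n) (skokow + 1)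
      else none

-- the recursion, on a fuel bounding its depth (each jump advances i by at least 2)
def przejscieGo (T : List Int) : Nat → Int → Int → Option Int
  | 0, _, _ => none  -- fuel exhausted (unreachable: the fuel below bounds the depth)
  | fuel + 1, i, skokow =>
    if i = (T.length : Int) - 1 then some skokow
    else if i > (T.length : Int) - 1 then some (-1)
    else
      match PySem.List.pyGet? T i with
      | none => none  -- IndexError (outside Pre_przejscie)
      | some n =>
        przejscieWhile (fun j s => przejscieGo T fuel j s) T i skokow ((n + 1).toNat + 1) n 2

def przejscie (T : List Int) (i : Int) (skokow : Int) : Option Int :=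
  przejscieGo T (((T.length : Int) - i).toNat + 1) i skokow

-- ===== PORT B =====
-- prime factors of n in nondecreasing order with multiplicity (Source B's _factors loop;
-- the fuel bounds the iteration count and is never exhausted at the call site below)
def bFactorsGo : Nat → Int → Int → List Int
  | 0, _, _ => []
  | fuel + 1, n, d =>
    if d * d ≤ n then
      if PySem.Int.mod n d = 0 then d :: bFactorsGo fuel (PySem.Int.floordiv n d) d
      else bFactorsGo fuel n (d + 1)
    else if 1 < n then [n] else []

-- Source B's val(j)
def bVal (last : Int) (h : PySem.Dict Int Int) (j : Int) : Int :=
  if j = last then 0 else if j > last then -1 else h.getD j (-1)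

-- Source B's inner 'for p in _factors(T[j]) … break' loop
def bScan (last : Int) (h : PySem.Dict Int Int) (j : Int) : List Int → Option Int
  | [] => none
  | p :: ps =>
    let r := bVal last h (j + p)
    if 0 ≤ r then some (1 + r) else bScan last h j ps

-- one iteration of Source B's 'for j in reversed(range(i, last))' loop
def bStep (T : List Int) (last : Int) (h : PySem.Dict Int Int) (j : Int) : PySem.Dict Int Int :=
  let m := (PySem.List.pyGet? T j).getD 0
  match bScan last h j (bFactorsGo ((m + 1).toNat + 1) m 2) with
  | some v => h.insert j v
  | none => h

def przejscie_alt (T : List Int) (i : Int) (skokow : Int) : Option Int :=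
  let last : Int := (T.length : Int) - 1
  if i = last then some skokow
  else if i > last then some (-1)
  else
    let h := ((PySem.List.pyRange i last 1).reverse).foldl (bStep T last) PySem.Dict.empty
    let r := bVal last h i
    if 0 ≤ r then some (skokow + r) else some (-1)

-- ===== PRECONDITION & SPEC =====
-- Pre_ excludes (besides out-of-range starts, an IndexError) in-range starts with negative
-- skokow — A's 'res > 0' success test then misreads completed paths as failures — and lists
-- containing a value ≤ 1 or prime, where a dead end makes A fall through returning None or
-- raise TypeError ('None > 0'); B reports every failure uniformly as -1.
def Pre_przejscie (T : List Int) (i : Int) (skokow : Int) : Prop :=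
  (T.length : Int) - 1 ≤ i ∨
    (0 ≤ skokow ∧ -(T.length : Int) ≤ i ∧ ∀ x ∈ T, 1 < x ∧ ¬ Nat.Prime x.toNat)
instance (T : List Int) (i : Int) (skokow : Int) : Decidable (Pre_przejscie T i skokow) := by
  unfold Pre_przejscie; infer_instance

def pvWitness_przejscie : List Int × Int × Int := ([4, 6, 4, 9, 4], 0, 0)

def Spec_przejscie (T : List Int) (i : Int) (skokow : Int) (out : Option Int) : Prop := out = przejscie_alt T i skokow
instance (T : List Int) (i : Int) (skokow : Int) (out : Option Int) : Decidable (Spec_przejscie T i skokow out) := by unfold Spec_przejscie; infer_instance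

-- ===== CLAIM (what is proved, stated in full; the proofs are below) =====
def Claim_equal_przejscie : Prop := ∀ (T : List Int) (i : Int) (skokow : Int), Dom_przejscie T i skokow → Pre_przejscie T i skokow → Spec_przejscie T i skokow (przejscie T i skokow)

-- ===== LEMMAS AND PROOFS =====

lemma pvDivLt (n b : Int) (hb : 2 ≤ b) (hbb : b * b ≤ n) :
    (PySem.Int.floordiv n b + 1 - b).toNat < (n + 1 - b).toNat := by
  have hfl := PySem.Int.floordiv_mul_add_mod n b
  have h1 := PySem.Int.mod_nonneg n (b := b) (by omega)
  have h2 := PySem.Int.mod_lt n (b := b) (by omega)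
  have hq0 : 0 ≤ PySem.Int.floordiv n b := by nlinarith
  have hqn : PySem.Int.floordiv n b * b ≤ n := by omega
  have h2q : 2 * PySem.Int.floordiv n b ≤ PySem.Int.floordiv n b * b := by nlinarith
  have hbb2 : 2 * b ≤ b * b := by nlinarith
  omega

lemma pvIncLt (n b : Int) (hb : 2 ≤ b) (hbb : b * b ≤ n) :
    (n + 1 - (b + 1)).toNat < (n + 1 - b).toNat := by
  have hbb2 : 2 * b ≤ b * b := by nlinarith
  omega

-- reference (proof-side) factor list: bFactorsGo with the fuel removed
def specFactors (n d : Int) (hd : 2 ≤ d) : List Int :=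
  if hw : d * d ≤ n then
    if PySem.Int.mod n d = 0 then d :: specFactors (PySem.Int.floordiv n d) d hd
    else specFactors n (d + 1) (by omega)
  else if 1 < n then [n] else []
termination_by (n + 1 - d).toNat
decreasing_by
  · exact pvDivLt n d hd hw
  · exact pvIncLt n d hd hw

lemma specFactors_two_le (n d : Int) (hd : 2 ≤ d) : ∀ p ∈ specFactors n d hd, 2 ≤ p := by
  fun_induction specFactors n d hd with
  | case1 n d hd hw hm ih =>
    intro p hp
    rcases List.mem_cons.mp hp with h | h
    · omega
    · exact ih p h
  | case2 n d hd hw hm ih => exact ih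
  | case3 n d hd hw h1 => intro p hp; simp only [List.mem_singleton] at hp; omega
  | case4 n d hd hw h1 => intro p hp; simp at hp

lemma bFactorsGo_eq_spec :
    ∀ (fuel : Nat) (n d : Int) (hd : 2 ≤ d), (n + 1 - d).toNat < fuel →
      bFactorsGo fuel n d = specFactors n d hd := by
  intro fuel
  induction fuel with
  | zero => intro n d hd hf; omega
  | succ fuel ih =>
    intro n d hd hf
    rw [bFactorsGo]
    rw [specFactors.eq_def]
    by_cases hw : d * d ≤ n
    · rw [if_pos hw, dif_pos hw]
      by_cases hm : PySem.Int.mod n d = 0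
      · rw [if_pos hm, if_pos hm]
        have := pvDivLt n d hd hw
        rw [ih (PySem.Int.floordiv n d) d hd (by omega)]
      · rw [if_neg hm, if_neg hm]
        have := pvIncLt n d hd hw
        rw [ih n (d + 1) (by omega) (by omega)]
    · rw [if_neg hw, dif_neg hw]

-- reference evaluation: Hspec T j = extra jumps A/B find from index j (-1 = failure)
mutual
def Hspec (T : List Int) (j : Int) : Int :=
  if hj : j < (T.length : Int) - 1 then
    HspecGo T j hj (specFactors ((PySem.List.pyGet? T j).getD 0) 2 (by norm_num))
      (specFactors_two_le _ _ _)
  else if j = (T.length : Int) - 1 then 0 else -1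
termination_by (((T.length : Int) - j).toNat, 1, (0:Nat))
decreasing_by
  exact Prod.Lex.right _ (Prod.Lex.left _ _ (by omega))

def HspecGo (T : List Int) (j : Int) (hj : j < (T.length : Int) - 1) :
    (fs : List Int) → (∀ p ∈ fs, 2 ≤ p) → Int
  | [], _ => -1
  | p :: ps, hf =>
    let r := Hspec T (j + p)
    if 0 ≤ r then 1 + r
    else HspecGo T j hj ps (fun q hq => hf q (List.mem_cons_of_mem _ hq))
termination_by fs _ => (((T.length : Int) - j).toNat, 0, fs.length + 1)
decreasing_by
  · exact Prod.Lex.left _ _ (by have := hf p (List.mem_cons_self); omega)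
  · exact Prod.Lex.right _ (Prod.Lex.right _ (by simp))
end

lemma Hspec_last (T : List Int) : Hspec T ((T.length : Int) - 1) = 0 := by
  rw [Hspec]; simp

lemma Hspec_over (T : List Int) (j : Int) (h : (T.length : Int) - 1 < j) :
    Hspec T j = -1 := by
  rw [Hspec]; rw [dif_neg (by omega)]; rw [if_neg (by omega)]

lemma Hspec_pos (T : List Int) (j : Int) (hj : j < (T.length : Int) - 1) :
    Hspec T j = HspecGo T j hj (specFactors ((PySem.List.pyGet? T j).getD 0) 2 (by norm_num))
      (specFactors_two_le _ _ _) := by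
  rw [Hspec]; rw [dif_pos hj]

lemma HspecGo_cases (T : List Int) (j : Int) (hj : j < (T.length : Int) - 1) :
    ∀ (fs : List Int) (hfs : ∀ p ∈ fs, 2 ≤ p),
      0 ≤ HspecGo T j hj fs hfs ∨ HspecGo T j hj fs hfs = -1 := by
  intro fs
  induction fs with
  | nil => intro hfs; right; rw [HspecGo]
  | cons p ps ih =>
    intro hfs
    rw [HspecGo]
    by_cases h0 : 0 ≤ Hspec T (j + p)
    · left; simp only [h0, if_pos]; omega
    · simp only [if_neg h0]; exact ih _

lemma bScan_eq (T : List Int) (h : PySem.Dict Int Int) (k : Int)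
    (hk : k < (T.length : Int) - 1)
    (hagree : ∀ j, k + 1 ≤ j → bVal ((T.length : Int) - 1) h j = Hspec T j) :
    ∀ (fs : List Int) (hfs : ∀ p ∈ fs, 2 ≤ p),
      bScan ((T.length : Int) - 1) h k fs =
        if 0 ≤ HspecGo T k hk fs hfs then some (HspecGo T k hk fs hfs) else none := by
  intro fs
  induction fs with
  | nil => intro hfs; rw [bScan, HspecGo]; simp
  | cons p ps ih =>
    intro hfs
    have hp : 2 ≤ p := hfs p List.mem_cons_self
    have hv : bVal ((T.length : Int) - 1) h (k + p) = Hspec T (k + p) :=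
      hagree _ (by omega)
    rw [bScan, HspecGo]
    simp only [hv]
    by_cases h0 : 0 ≤ Hspec T (k + p)
    · simp only [if_pos h0]; rw [if_pos (by omega)]
    · simp only [if_neg h0]; exact ih _

lemma bVal_congr_ne (last : Int) (h : PySem.Dict Int Int) (k v j : Int) (hne : j ≠ k) :
    bVal last (h.insert k v) j = bVal last h j := by
  unfold bVal
  split
  · rfl
  · split
    · rfl
    · exact PySem.Dict.getD_insert_of_ne h v (-1) hne

lemma bFold_inv (T : List Int) :
    ∀ (μ : Nat) (k : Int), (((T.length : Int) - 1) - k).toNat ≤ μ →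
      (∀ j, k ≤ j →
        bVal ((T.length : Int) - 1)
          (((PySem.List.pyRange k ((T.length : Int) - 1) 1).reverse).foldl
            (bStep T ((T.length : Int) - 1)) PySem.Dict.empty) j = Hspec T j)
      ∧ (∀ j, j < k →
        (((PySem.List.pyRange k ((T.length : Int) - 1) 1).reverse).foldl
            (bStep T ((T.length : Int) - 1)) PySem.Dict.empty).getD j (-1) = -1) := by
  intro μ
  induction μ with
  | zero =>
    intro k hμ
    have hk : (T.length : Int) - 1 ≤ k := by omega
    rw [PySem.List.pyRange_one_eq_nil hk]
    constructor
    · intro j hj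
      unfold bVal
      split
      · rename_i hlj; rw [hlj, Hspec_last]
      · split
        · rename_i h1 h2; rw [Hspec_over T j (by omega)]
        · rename_i h1 h2; omega
    · intro j hj; simp [PySem.Dict.getD_empty]
  | succ μ ih =>
    intro k hμ
    by_cases hk : (T.length : Int) - 1 ≤ k
    · rw [PySem.List.pyRange_one_eq_nil hk]
      constructor
      · intro j hj
        unfold bVal
        split
        · rename_i hlj; rw [hlj, Hspec_last]
        · split
          · rename_i h1 h2; rw [Hspec_over T j (by omega)]
          · rename_i h1 h2; omega
      · intro j hj; simp [PySem.Dict.getD_empty]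
    · have hklt : k < (T.length : Int) - 1 := by omega
      rw [PySem.List.pyRange_one_cons hklt]
      simp only [List.reverse_cons, List.foldl_append, List.foldl_cons, List.foldl_nil]
      obtain ⟨ih1, ih2⟩ := ih (k + 1) (by omega)
      have hagree : ∀ j, k + 1 ≤ j →
          bVal ((T.length : Int) - 1)
            (((PySem.List.pyRange (k+1) ((T.length : Int) - 1) 1).reverse).foldl
              (bStep T ((T.length : Int) - 1)) PySem.Dict.empty) j = Hspec T j :=
        fun j hj => ih1 j hj
      set h' := ((PySem.List.pyRange (k+1) ((T.length : Int) - 1) 1).reverse).foldl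
          (bStep T ((T.length : Int) - 1)) PySem.Dict.empty with hh'
      have hstep : bStep T ((T.length : Int) - 1) h' k =
          (if 0 ≤ Hspec T k then h'.insert k (Hspec T k) else h') := by
        unfold bStep
        dsimp only
        rw [bFactorsGo_eq_spec _ _ _ (by norm_num) (by omega)]
        rw [bScan_eq T h' k hklt hagree _ (specFactors_two_le _ _ _)]
        rw [Hspec_pos T k hklt]
        by_cases h0 : 0 ≤ HspecGo T k hklt
            (specFactors ((PySem.List.pyGet? T k).getD 0) 2 (by norm_num)) (specFactors_two_le _ _ _)
        · rw [if_pos h0, if_pos h0]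
        · rw [if_neg h0, if_neg h0]
      rw [hstep]
      by_cases h0 : 0 ≤ Hspec T k
      · rw [if_pos h0]
        constructor
        · intro j hj
          by_cases hjk : j = k
          · rw [hjk]
            unfold bVal
            rw [if_neg (by omega), if_neg (by omega)]
            exact PySem.Dict.getD_insert_self h' k (Hspec T k) (-1)
          · rw [bVal_congr_ne _ _ _ _ _ hjk]
            exact ih1 j (by omega)
        · intro j hj
          rw [PySem.Dict.getD_insert_of_ne h' (Hspec T k) (-1) (by omega)]
          exact ih2 j (by omega)
      · rw [if_neg h0]
        constructor
        · intro j hj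
          by_cases hjk : j = k
          · rw [hjk]
            unfold bVal
            rw [if_neg (by omega), if_neg (by omega)]
            rw [ih2 k (by omega)]
            rcases HspecGo_cases T k hklt
                (specFactors ((PySem.List.pyGet? T k).getD 0) 2 (by norm_num))
                (specFactors_two_le _ _ _) with hc | hc
            · exfalso; rw [Hspec_pos T k hklt] at h0; exact h0 hc
            · rw [Hspec_pos T k hklt, hc]
          · exact ih1 j (by omega)
        · intro j hj
          exact ih2 j (by omega)

lemma HspecGo_congr (T : List Int) (j : Int) (hj : j < (T.length : Int) - 1)
    {fs fs' : List Int} (h : fs = fs')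
    (hfs : ∀ p ∈ fs, 2 ≤ p) (hfs' : ∀ p ∈ fs', 2 ≤ p) :
    HspecGo T j hj fs hfs = HspecGo T j hj fs' hfs' := by subst h; rfl

lemma n_ne_N (N n b : Int) (hN1 : 1 < N) (hN2 : ¬ Nat.Prime N.toNat)
    (hb : 2 ≤ b) (hexit : ¬ b * b ≤ n)
    (hsm : ∀ d : Int, 2 ≤ d → d < b → ¬ d ∣ n) : n ≠ N := by
  intro heq
  subst heq
  have h0 : 0 < n.toNat := by omega
  have hq1 : n.toNat.minFac ∣ n.toNat := Nat.minFac_dvd _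
  have hq2 : 2 ≤ n.toNat.minFac := (Nat.minFac_prime (by omega)).two_le
  have hq3 : n.toNat.minFac ^ 2 ≤ n.toNat := Nat.minFac_sq_le_self h0 hN2
  have hcast : ((n.toNat : Int)) = n := Int.toNat_of_nonneg (by omega)
  have hqd : (n.toNat.minFac : Int) ∣ n := by
    rw [← hcast]; exact_mod_cast hq1
  have hq2' : (2 : Int) ≤ (n.toNat.minFac : Int) := by exact_mod_cast hq2
  have hqq : (n.toNat.minFac : Int) * (n.toNat.minFac : Int) ≤ n := by
    have h : ((n.toNat.minFac ^ 2 : Nat) : Int) ≤ ((n.toNat : Nat) : Int) := by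
      exact_mod_cast hq3
    rw [hcast] at h; push_cast at h; nlinarith [h]
  have hqb : (n.toNat.minFac : Int) < b := by nlinarith [hqq, hq2']
  exact hsm _ hq2' hqb hqd

lemma loop_eq (T : List Int) (i skokow : Int) (hi : i < (T.length : Int) - 1)
    (N : Int) (HN : PySem.List.pyGet? T i = some N)
    (hN1 : 1 < N) (hN2 : ¬ Nat.Prime N.toNat) (hs : 0 ≤ skokow)
    (rec : Int → Int → Option Int)
    (Hrec : ∀ j' s', i < j' → 0 ≤ s' →
      rec j' s' = some (if 0 ≤ Hspec T j' then s' + Hspec T j' else -1)) :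
    ∀ (lf : Nat) (n b : Int) (hb : 2 ≤ b), (n + 1 - b).toNat < lf → 2 ≤ n → n ∣ N →
      (∀ d : Int, 2 ≤ d → d < b → ¬ d ∣ n) →
      przejscieWhile rec T i skokow lf n b =
        some (if 0 ≤ HspecGo T i hi (specFactors n b hb) (specFactors_two_le n b hb)
              then skokow + HspecGo T i hi (specFactors n b hb) (specFactors_two_le n b hb)
              else -1) := by
  intro lf
  induction lf with
  | zero => intro n b hb hf _ _ _; omega
  | succ lf ih =>
    intro n b hb hf h2n hdvd hsm
    rw [przejscieWhile]
    by_cases hbb : b * b ≤ n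
    · rw [if_pos (⟨by omega, hbb⟩ : 1 < n ∧ b * b ≤ n)]
      by_cases hmod : PySem.Int.mod n b = 0
      · have hbd : b ∣ n := (PySem.Int.mod_eq_zero_iff_dvd n b).mp hmod
        rw [if_pos hmod]
        have hfl := PySem.Int.floordiv_mul_add_mod n b
        rw [hmod] at hfl
        have hq2 : 2 ≤ PySem.Int.floordiv n b := by
          have : b ≤ PySem.Int.floordiv n b :=
            (PySem.Int.le_floordiv_iff_mul_le (by omega)).mpr hbb
          omega
        have hqdvd : PySem.Int.floordiv n b ∣ n := Dvd.intro b (by linarith [hfl])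
        have hfac : specFactors n b hb = b :: specFactors (PySem.Int.floordiv n b) b hb := by
          rw [specFactors.eq_def]; rw [dif_pos hbb, if_pos hmod]
        have hcons : ∀ p ∈ b :: specFactors (PySem.Int.floordiv n b) b hb, 2 ≤ p := by
          intro p hp
          rcases List.mem_cons.mp hp with h | h
          · omega
          · exact specFactors_two_le _ _ _ p h
        rw [HspecGo_congr T i hi hfac (specFactors_two_le n b hb) hcons]
        rw [HspecGo]
        have hIH := Hrec (i + b) (skokow + 1) (by omega) (by omega)
        have hlt := pvDivLt n b hb hbb
        by_cases h0 : 0 ≤ Hspec T (i + b)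
        · rw [if_pos h0] at hIH
          rw [hIH]
          dsimp only
          rw [if_pos (by omega : skokow + 1 + Hspec T (i + b) > 0)]
          simp only [if_pos h0]
          rw [if_pos (by omega : (0:Int) ≤ 1 + Hspec T (i + b))]
          congr 1; omega
        · rw [if_neg h0] at hIH
          rw [hIH]
          dsimp only
          rw [if_neg (by omega : ¬ (-1 : Int) > 0)]
          simp only [if_neg h0]
          exact ih (PySem.Int.floordiv n b) b hb (by omega) (by omega)
            (dvd_trans hqdvd hdvd)
            (fun d hd2 hdb hddvd => hsm d hd2 hdb (dvd_trans hddvd hqdvd))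
      · rw [if_neg hmod]
        have hnb : ¬ b ∣ n := fun hd => hmod ((PySem.Int.mod_eq_zero_iff_dvd n b).mpr hd)
        have hlt := pvIncLt n b hb hbb
        have step : przejscieWhile rec T i skokow lf n (b + 1) =
            some (if 0 ≤ HspecGo T i hi (specFactors n (b + 1) (by omega))
                    (specFactors_two_le n (b + 1) (by omega))
                  then skokow + HspecGo T i hi (specFactors n (b + 1) (by omega))
                    (specFactors_two_le n (b + 1) (by omega))
                  else -1) :=
          ih n (b + 1) (by omega) (by omega) h2n hdvd
            (fun d hd2 hdb hddvd => by
              rcases lt_or_eq_of_le (by omega : d ≤ b) with h | h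
              · exact hsm d hd2 h hddvd
              · subst h; exact hnb hddvd)
        rw [step]
        have hfac : specFactors n b hb = specFactors n (b + 1) (by omega) := by
          rw [specFactors.eq_def]; rw [dif_pos hbb, if_neg hmod]
        rw [HspecGo_congr T i hi hfac (specFactors_two_le n b hb)
          (specFactors_two_le n (b + 1) (by omega))]
    · rw [if_neg (by intro hw; exact hbb hw.2)]
      have hne : n ≠ N := n_ne_N N n b hN1 hN2 hb hbb hsm
      rw [if_pos (by refine ⟨by omega, ?_⟩; rw [HN]; simpa using hne)]
      rw [Hrec (i + n) (skokow + 1) (by omega) (by omega)]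
      have hfac : specFactors n b hb = [n] := by
        rw [specFactors.eq_def]; rw [dif_neg hbb, if_pos (by omega : (1:Int) < n)]
      have hone : ∀ p ∈ ([n] : List Int), 2 ≤ p := by
        intro p hp; simp only [List.mem_singleton] at hp; omega
      rw [HspecGo_congr T i hi hfac (specFactors_two_le n b hb) hone]
      rw [HspecGo]
      by_cases h0 : 0 ≤ Hspec T (i + n)
      · rw [if_pos h0]
        simp only [if_pos h0]
        rw [if_pos (by omega)]
        congr 1; omega
      · rw [if_neg h0]
        simp only [if_neg h0]
        rw [HspecGo]
        rw [if_neg (by omega)]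

lemma A_eq (T : List Int) (hcomp : ∀ x ∈ T, 1 < x ∧ ¬ Nat.Prime x.toNat) :
    ∀ (fuel : Nat) (j s : Int), ((T.length : Int) - j).toNat < fuel → -(T.length : Int) ≤ j →
      0 ≤ s → przejscieGo T fuel j s = some (if 0 ≤ Hspec T j then s + Hspec T j else -1) := by
  intro fuel
  induction fuel with
  | zero => intro j s hf _ _; omega
  | succ fuel ih =>
    intro j s hf hlo hs
    rw [przejscieGo]
    by_cases h1 : j = (T.length : Int) - 1
    · rw [if_pos h1]
      rw [h1, Hspec_last, if_pos (by omega)]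
      congr 1; omega
    · rw [if_neg h1]
      by_cases h2 : j > (T.length : Int) - 1
      · rw [if_pos h2]
        rw [Hspec_over T j (by omega), if_neg (by omega)]
      · rw [if_neg h2]
        have hj : j < (T.length : Int) - 1 := by omega
        have hsome : ∃ N, PySem.List.pyGet? T j = some N := by
          cases h : PySem.List.pyGet? T j with
          | none =>
            rw [PySem.List.pyGet?_eq_none_iff] at h
            exact absurd ⟨by omega, by omega⟩ h
          | some N => exact ⟨N, rfl⟩
        obtain ⟨N, HN⟩ := hsome
        have hNmem := PySem.List.mem_of_pyGet?_eq_some T HN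
        obtain ⟨hN1, hN2⟩ := hcomp N hNmem
        have hIH : ∀ j' s', j < j' → 0 ≤ s' →
            przejscieGo T fuel j' s' =
              some (if 0 ≤ Hspec T j' then s' + Hspec T j' else -1) := by
          intro j' s' hjj hs'
          exact ih j' s' (by omega) (by omega) hs'
        have hloop := loop_eq T j s hj N HN hN1 hN2 hs
          (fun j' s' => przejscieGo T fuel j' s') hIH
          ((N + 1).toNat + 1) N 2 (by norm_num) (by omega) (by omega) dvd_rfl
          (by intro d hd2 hdb _; omega)
        rw [Hspec_pos T j hj]
        have hgo : HspecGo T j hj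
              (specFactors ((PySem.List.pyGet? T j).getD 0) 2 (by norm_num))
              (specFactors_two_le _ _ _) =
            HspecGo T j hj (specFactors N 2 (by norm_num)) (specFactors_two_le _ _ _) := by
          apply HspecGo_congr
          rw [HN]
          rfl
        rw [hgo]
        rw [HN]
        exact hloop

theorem przejscie_spec : Claim_equal_przejscie := by
  intro T i skokow _hDom hPre
  unfold Spec_przejscie
  show przejscie T i skokow = przejscie_alt T i skokow
  unfold przejscie
  rcases hPre with hge | ⟨hs, hlo, hcomp⟩
  · rw [przejscieGo]
    unfold przejscie_alt
    by_cases h1 : i = (T.length : Int) - 1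
    · rw [if_pos h1, if_pos h1]
    · rw [if_neg h1, if_pos (by omega : i > (T.length : Int) - 1)]
      rw [if_neg h1, if_pos (by omega : i > (T.length : Int) - 1)]
  · by_cases h1 : i = (T.length : Int) - 1
    · rw [przejscieGo]
      unfold przejscie_alt
      rw [if_pos h1, if_pos h1]
    · by_cases h2 : i > (T.length : Int) - 1
      · rw [przejscieGo]
        unfold przejscie_alt
        rw [if_neg h1, if_pos h2, if_neg h1, if_pos h2]
      · have hj : i < (T.length : Int) - 1 := by omega
        rw [A_eq T hcomp ((((T.length : Int) - i).toNat) + 1) i skokow (by omega) hlo hs]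
        unfold przejscie_alt
        rw [if_neg h1, if_neg (by omega : ¬ i > (T.length : Int) - 1)]
        obtain ⟨inv1, _⟩ := bFold_inv T ((((T.length : Int) - 1) - i).toNat) i (le_refl _)
        dsimp only
        rw [inv1 i (le_refl i)]
        by_cases h0 : 0 ≤ Hspec T i
        · rw [if_pos h0, if_pos h0]
        · rw [if_neg h0, if_neg h0]
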